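-- pv_equiv track=rewrite | github.com/ChristosPAl/ChordIdentifier | test.py | label_chord
-- ===== SOURCE A (Python) =====
-- NOTE_NAMES = ['C', 'C#', 'D', 'D#', 'E', 'F', 'F#', 'G', 'G#', 'A', 'A#', 'B']
--
-- def label_chord(note_set):
--     """
--     Label a chord by checking for simple major or minor triad patterns.
--     The algorithm assumes note_set (a set of note names, e.g., {'C', 'E', 'G'}).
--     """
--     def note_to_num(note):
--         return NOTE_NAMES.index(note)
--
--     note_nums = sorted([note_to_num(n) for n in note_set])
--     for root in note_nums:
--         # Compute intervals relative to the root note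
--         intervals = sorted(((n - root) % 12) for n in note_nums)
--         if set(intervals) == set([0, 4, 7]):
--             return f"{NOTE_NAMES[root]} Major"
--         if set(intervals) == set([0, 3, 7]):
--             return f"{NOTE_NAMES[root]} Minor"
--     return "Unknown Chord"
-- ===== SOURCE B (Python) =====
-- NOTE_NAMES = ['C', 'C#', 'D', 'D#', 'E', 'F', 'F#', 'G', 'G#', 'A', 'A#', 'B']
--
-- def label_chord(note_set):
--     # Different decomposition: dedup pitch classes once, then classify the
--     # sorted triple by its cyclic interval-gap fingerprint instead of testing
--     # every note as a root against target interval sets.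
--     pcs = sorted({NOTE_NAMES.index(n) for n in note_set})
--     if len(pcs) != 3:
--         return "Unknown Chord"
--     p0, p1, p2 = pcs
--     gaps = [p1 - p0, p2 - p1, p0 + 12 - p2]
--     for i in range(3):
--         rot = (gaps[i], gaps[(i + 1) % 3], gaps[(i + 2) % 3])
--         if rot == (4, 3, 5):
--             return NOTE_NAMES[pcs[i]] + " Major"
--         if rot == (3, 4, 5):
--             return NOTE_NAMES[pcs[i]] + " Minor"
--     return "Unknown Chord"
-- ===== Notes on version B (the rewrite author's own statement) =====
-- stated objective: alternative
-- what changed: B dedups the pitch classes once and classifies the sorted triple by its cyclic interval-gap fingerprint ((4,3,5) major / (3,4,5) minor rotations), instead of A's per-root rescan that sorts the interval list and compares interval sets for every candidate root.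
import Mathlib
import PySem

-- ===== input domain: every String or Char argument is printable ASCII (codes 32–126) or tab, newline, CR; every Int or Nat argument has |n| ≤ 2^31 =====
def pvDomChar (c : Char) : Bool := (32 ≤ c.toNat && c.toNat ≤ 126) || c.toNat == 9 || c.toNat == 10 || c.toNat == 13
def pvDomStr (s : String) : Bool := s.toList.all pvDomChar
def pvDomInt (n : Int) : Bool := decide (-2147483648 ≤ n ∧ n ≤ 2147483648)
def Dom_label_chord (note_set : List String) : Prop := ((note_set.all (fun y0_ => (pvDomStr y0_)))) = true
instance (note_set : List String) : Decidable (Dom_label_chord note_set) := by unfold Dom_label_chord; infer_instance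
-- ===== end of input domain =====

-- B replaces A's per-root interval-set scan by a single gap-fingerprint classification of the deduplicated sorted pitch classes; objective: alternative/simpler.

-- ===== PORT A =====
def pvNoteNames : List String := ["C", "C#", "D", "D#", "E", "F", "F#", "G", "G#", "A", "A#", "B"]

def pvNoteToNum (note : String) : Int :=
  (((PySem.List.index? pvNoteNames note).getD 0 : Nat) : Int)

def pvCheckRoot (noteNums : List Int) (root : Int) : Option String :=
  let intervals := PySem.List.sorted (noteNums.map (fun n => PySem.Int.mod (n - root) 12)) (fun x => x) false
  if PySem.Set.equal (PySem.Set.ofList intervals) (PySem.Set.ofList [0, 4, 7]) then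
    some (PySem.List.pyGetD pvNoteNames root "" ++ " Major")
  else if PySem.Set.equal (PySem.Set.ofList intervals) (PySem.Set.ofList [0, 3, 7]) then
    some (PySem.List.pyGetD pvNoteNames root "" ++ " Minor")
  else none

def label_chord (note_set : List String) : String :=
  let noteNums := PySem.List.sorted (note_set.map pvNoteToNum) (fun x => x) false
  (noteNums.findSome? (pvCheckRoot noteNums)).getD "Unknown Chord"

-- ===== PORT B =====
def pvNoteToNumB (note : String) : Int :=
  (((PySem.List.index? pvNoteNames note).getD 0 : Nat) : Int)

def pvRotCheck (pcs gaps : List Int) (i : Nat) : Option String :=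
  let g0 := PySem.List.pyGetD gaps (i : Int) 0
  let g1 := PySem.List.pyGetD gaps (((i + 1) % 3 : Nat) : Int) 0
  let g2 := PySem.List.pyGetD gaps (((i + 2) % 3 : Nat) : Int) 0
  if (g0, g1, g2) = (4, 3, 5) then
    some (PySem.List.pyGetD pvNoteNames (PySem.List.pyGetD pcs (i : Int) 0) "" ++ " Major")
  else if (g0, g1, g2) = (3, 4, 5) then
    some (PySem.List.pyGetD pvNoteNames (PySem.List.pyGetD pcs (i : Int) 0) "" ++ " Minor")
  else none

def label_chord_alt (note_set : List String) : String :=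
  let pcs := PySem.List.sorted (PySem.Set.ofList (note_set.map pvNoteToNumB)) (fun x => x) false
  if pcs.length ≠ 3 then "Unknown Chord"
  else
    match pcs with
    | [p0, p1, p2] =>
      let gaps := [p1 - p0, p2 - p1, p0 + 12 - p2]
      (([0, 1, 2] : List Nat).findSome? (pvRotCheck pcs gaps)).getD "Unknown Chord"
    | _ => "Unknown Chord"

-- ===== PRECONDITION & SPEC =====
-- Pre_ excludes exactly the inputs containing a note name outside NOTE_NAMES, on which A's NOTE_NAMES.index raises ValueError.
def Pre_label_chord (note_set : List String) : Prop := ∀ n ∈ note_set, n ∈ pvNoteNames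
instance (note_set : List String) : Decidable (Pre_label_chord note_set) := by unfold Pre_label_chord; infer_instance

def pvWitness_label_chord : List String := ["E", "C", "G"]

def Spec_label_chord (note_set : List String) (out : String) : Prop := out = label_chord_alt note_set
instance (note_set : List String) (out : String) : Decidable (Spec_label_chord note_set out) := by unfold Spec_label_chord; infer_instance

-- ===== CLAIM (what is proved, stated in full; the proofs are below) =====
def Claim_equal_label_chord : Prop := ∀ (note_set : List String), Dom_label_chord note_set → Pre_label_chord note_set → Spec_label_chord note_set (label_chord note_set)

-- ===== LEMMAS AND PROOFS =====

-- the full chromatic scale 0..11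
def pvFull : List Int := [0, 1, 2, 3, 4, 5, 6, 7, 8, 9, 10, 11]

-- canonical strictly sorted list of the pitch classes occurring in nums
def pvCanon (nums : List Int) : List Int := pvFull.filter (fun x => decide (x ∈ nums))

def pvCoreA (L : List Int) : String := (L.findSome? (pvCheckRoot L)).getD "Unknown Chord"

def pvCoreB (L : List Int) : String :=
  if L.length ≠ 3 then "Unknown Chord"
  else
    match L with
    | [p0, p1, p2] =>
      let gaps := [p1 - p0, p2 - p1, p0 + 12 - p2]
      (([0, 1, 2] : List Nat).findSome? (pvRotCheck L gaps)).getD "Unknown Chord"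
    | _ => "Unknown Chord"

theorem pv_mem_full (x : Int) : x ∈ pvFull ↔ 0 ≤ x ∧ x < 12 := by
  simp [pvFull]; omega

theorem pv_findSome?_eq_filter {α β : Type} (f : α → Option β) (l : List α) :
    l.findSome? f = ((l.filter (fun x => (f x).isSome)).head?.bind f) := by
  induction l with
  | nil => rfl
  | cons a t ih =>
    cases h : f a with
    | none => simpa [h] using ih
    | some v => simp [h]

theorem pv_findSome?_congr {α β : Type} (f g : α → Option β) (l : List α)
    (h : ∀ x ∈ l, f x = g x) : l.findSome? f = l.findSome? g := by
  induction l with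
  | nil => rfl
  | cons a t ih =>
    simp only [List.findSome?_cons, h a (by simp)]
    cases g a with
    | none => exact ih (fun x hx => h x (by simp [hx]))
    | some v => rfl

theorem pv_head?_sorted_eq (l l' : List Int)
    (hl : l.Pairwise (· ≤ ·)) (hl' : l'.Pairwise (· ≤ ·))
    (hm : ∀ x, x ∈ l ↔ x ∈ l') : l.head? = l'.head? := by
  cases l with
  | nil =>
    cases l' with
    | nil => rfl
    | cons a t => exact absurd ((hm a).2 (by simp)) (by simp)
  | cons a t =>
    cases l' with
    | nil => exact absurd ((hm a).1 (by simp)) (by simp)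
    | cons a' t' =>
      have h1 : a' ≤ a := by
        rcases List.mem_cons.1 ((hm a).1 (by simp)) with h | h
        · omega
        · exact (List.pairwise_cons.1 hl').1 a h
      have h2 : a ≤ a' := by
        rcases List.mem_cons.1 ((hm a').2 (by simp)) with h | h
        · omega
        · exact (List.pairwise_cons.1 hl).1 a' h
      simp; omega

theorem pv_strict_sorted_mem_eq (l : List Int) (l' : List Int)
    (hl : l.Pairwise (· < ·)) (hl' : l'.Pairwise (· < ·))
    (hm : ∀ x, x ∈ l ↔ x ∈ l') : l = l' := by
  induction l generalizing l' with
  | nil =>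
    cases l' with
    | nil => rfl
    | cons a t => exact absurd ((hm a).2 (by simp)) (by simp)
  | cons a t ih =>
    cases l' with
    | nil => exact absurd ((hm a).1 (by simp)) (by simp)
    | cons a' t' =>
      have h1 : a' ≤ a := by
        rcases List.mem_cons.1 ((hm a).1 (by simp)) with h | h
        · omega
        · exact le_of_lt ((List.pairwise_cons.1 hl').1 a h)
      have h2 : a ≤ a' := by
        rcases List.mem_cons.1 ((hm a').2 (by simp)) with h | h
        · omega
        · exact le_of_lt ((List.pairwise_cons.1 hl).1 a' h)
      have heq : a = a' := le_antisymm h2 h1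
      subst heq
      have htm : ∀ x, x ∈ t ↔ x ∈ t' := by
        intro x
        constructor
        · intro hx
          have hax : a < x := (List.pairwise_cons.1 hl).1 x hx
          rcases List.mem_cons.1 ((hm x).1 (by simp [hx])) with rfl | h
          · omega
          · exact h
        · intro hx
          have hax : a < x := (List.pairwise_cons.1 hl').1 x hx
          rcases List.mem_cons.1 ((hm x).2 (by simp [hx])) with rfl | h
          · omega
          · exact h
      rw [ih t' (List.pairwise_cons.1 hl).2 (List.pairwise_cons.1 hl').2 htm]

-- pvCheckRoot only depends on the membership set of its list argument
theorem pv_checkRoot_mem_congr (l l' : List Int) (r : Int)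
    (hm : ∀ x, x ∈ l ↔ x ∈ l') : pvCheckRoot l r = pvCheckRoot l' r := by
  have key : ∀ t : List Int,
      PySem.Set.equal (PySem.Set.ofList (PySem.List.sorted (l.map (fun n => PySem.Int.mod (n - r) 12)) (fun x => x) false)) (PySem.Set.ofList t)
      = PySem.Set.equal (PySem.Set.ofList (PySem.List.sorted (l'.map (fun n => PySem.Int.mod (n - r) 12)) (fun x => x) false)) (PySem.Set.ofList t) := by
    intro t
    rw [Bool.eq_iff_iff, PySem.Set.equal_iff, PySem.Set.equal_iff]
    constructor <;> intro h x <;>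
      simpa [PySem.Set.mem_ofList, PySem.List.mem_sorted, List.mem_map, hm] using
        (by simpa [PySem.Set.mem_ofList, PySem.List.mem_sorted, List.mem_map, hm] using h x : _)
  simp only [pvCheckRoot, key]

-- residues mod 12 are injective on [0, 12)
theorem pv_mod_inj (r x y : Int) (hx : 0 ≤ x ∧ x < 12) (hy : 0 ≤ y ∧ y < 12)
    (h : PySem.Int.mod (x - r) 12 = PySem.Int.mod (y - r) 12) : x = y := by
  rw [PySem.Int.mod_eq_emod_of_pos (by omega), PySem.Int.mod_eq_emod_of_pos (by omega)] at h
  have : (12 : Int) ∣ (y - r) - (x - r) := Int.ModEq.dvd h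
  omega

-- when the list does not hold exactly 3 distinct classes, no root matches
theorem pv_checkRoot_none (L : List Int) (r : Int)
    (hnd : L.Nodup) (hbL : ∀ x ∈ L, 0 ≤ x ∧ x < 12) (hlen : L.length ≠ 3) :
    pvCheckRoot L r = none := by
  have hmapnd : (L.map (fun n => PySem.Int.mod (n - r) 12)).Nodup := by
    refine List.Nodup.map_on ?_ hnd
    intro x hx y hy h
    exact pv_mod_inj r x y (hbL x hx) (hbL y hy) h
  have hlen3 : ∀ t : List Int, t.Nodup → t.length = 3 →
      PySem.Set.equal (PySem.Set.ofList (PySem.List.sorted (L.map (fun n => PySem.Int.mod (n - r) 12)) (fun x => x) false)) (PySem.Set.ofList t) = true → False := by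
    intro t htnd htlen h
    rw [PySem.Set.equal_iff] at h
    have hperm : (L.map (fun n => PySem.Int.mod (n - r) 12)).Perm t := by
      rw [List.perm_ext_iff_of_nodup hmapnd htnd]
      intro x
      have := h x
      simpa [PySem.Set.mem_ofList, PySem.List.mem_sorted] using this
    have := hperm.length_eq
    simp at this
    omega
  unfold pvCheckRoot
  simp only
  split
  · exact absurd (hlen3 [0, 4, 7] (by decide) (by decide) (by assumption)) (by simp)
  · split
    · exact absurd (hlen3 [0, 3, 7] (by decide) (by decide) (by assumption)) (by simp)
    · rfl

set_option maxHeartbeats 1000000 in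
theorem pv_triple_eq : ∀ a < 12, ∀ b < 12, ∀ c < 12, a < b → b < c →
    pvCoreA [(a : Nat), (b : Nat), (c : Nat)] = pvCoreB [(a : Nat), (b : Nat), (c : Nat)] := by
  decide

theorem pv_core_eq (L : List Int) (hL : L.Pairwise (· < ·))
    (hbL : ∀ x ∈ L, 0 ≤ x ∧ x < 12) : pvCoreA L = pvCoreB L := by
  by_cases hlen : L.length = 3
  · rcases List.length_eq_three.1 hlen with ⟨a, b, c, rfl⟩
    have ha := hbL a (by simp)
    have hb := hbL b (by simp)
    have hc := hbL c (by simp)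
    have hab : a < b := (List.pairwise_cons.1 hL).1 b (by simp)
    have hbc : b < c := ((List.pairwise_cons.1 (List.pairwise_cons.1 hL).2).1) c (by simp)
    have := pv_triple_eq a.toNat (by omega) b.toNat (by omega) c.toNat (by omega) (by omega) (by omega)
    rwa [Int.toNat_of_nonneg ha.1, Int.toNat_of_nonneg hb.1, Int.toNat_of_nonneg hc.1] at this
  · have hnone : L.findSome? (pvCheckRoot L) = none := by
      rw [List.findSome?_eq_none_iff]
      intro x _
      exact pv_checkRoot_none L x (hL.imp ne_of_lt) hbL hlen
    simp [pvCoreA, pvCoreB, hnone, hlen]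

-- ===== VERDICT (by name: the statement is the Claim_ definition above) =====
theorem pv_num_bound : ∀ n ∈ pvNoteNames, 0 ≤ pvNoteToNum n ∧ pvNoteToNum n < 12 := by
  intro n hn
  fin_cases hn <;> decide

theorem label_chord_spec : Claim_equal_label_chord := by
  intro note_set hdom hpre
  unfold Spec_label_chord
  have hfun : pvNoteToNumB = pvNoteToNum := rfl
  set nums := note_set.map pvNoteToNum with hnums
  have hb : ∀ x ∈ nums, 0 ≤ x ∧ x < 12 := by
    intro x hx
    rw [hnums, List.mem_map] at hx
    rcases hx with ⟨n, hn, rfl⟩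
    exact pv_num_bound n (hpre n hn)
  have hmemc : ∀ x, x ∈ pvCanon nums ↔ x ∈ nums := by
    intro x
    simp only [pvCanon, List.mem_filter, decide_eq_true_eq]
    constructor
    · exact fun h => h.2
    · exact fun h => ⟨(pv_mem_full x).2 (hb x h), h⟩
  have hcp : (pvCanon nums).Pairwise (· < ·) :=
    List.Pairwise.filter _ (by decide : pvFull.Pairwise (· < ·))
  have hbc : ∀ x ∈ pvCanon nums, 0 ≤ x ∧ x < 12 := fun x hx => hb x ((hmemc x).1 hx)
  have hmem_ns : ∀ x, x ∈ PySem.List.sorted nums (fun x => x) false ↔ x ∈ pvCanon nums := by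
    intro x
    rw [PySem.List.mem_sorted, hmemc]
  have hA : label_chord note_set = pvCoreA (pvCanon nums) := by
    unfold label_chord pvCoreA
    rw [← hnums]
    have h1 : (PySem.List.sorted nums (fun x => x) false).findSome?
          (pvCheckRoot (PySem.List.sorted nums (fun x => x) false))
        = (PySem.List.sorted nums (fun x => x) false).findSome? (pvCheckRoot (pvCanon nums)) :=
      pv_findSome?_congr _ _ _ (fun x _ => pv_checkRoot_mem_congr _ _ x hmem_ns)
    have h2 : (PySem.List.sorted nums (fun x => x) false).findSome? (pvCheckRoot (pvCanon nums))
        = (pvCanon nums).findSome? (pvCheckRoot (pvCanon nums)) := by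
      rw [pv_findSome?_eq_filter, pv_findSome?_eq_filter]
      congr 1
      apply pv_head?_sorted_eq
      · exact List.Pairwise.filter _ (by simpa using PySem.List.sorted_pairwise nums (fun x => x))
      · exact List.Pairwise.filter _ (hcp.imp le_of_lt)
      · intro x
        simp only [List.mem_filter]
        rw [hmem_ns]
    show (List.findSome? (pvCheckRoot (PySem.List.sorted nums fun x => x)) (PySem.List.sorted nums fun x => x)).getD "Unknown Chord" = _
    rw [h1, h2]
  have hBpcs : PySem.List.sorted (PySem.Set.ofList nums) (fun x => x) false = pvCanon nums := by
    apply pv_strict_sorted_mem_eq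
    · exact PySem.List.sorted_ofList_pairwise_lt nums
    · exact hcp
    · intro x
      rw [PySem.List.mem_sorted, PySem.Set.mem_ofList, hmemc]
  have hB : label_chord_alt note_set = pvCoreB (pvCanon nums) := by
    unfold label_chord_alt pvCoreB
    rw [hfun, ← hnums, hBpcs]
  rw [hA, hB]
  exact pv_core_eq _ hcp hbc
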